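-- pv_equiv track=rewrite | github.com/North-river1015/SienaProgrammingContestSolutions | 2023/gold/q7.py | find_val
-- ===== SOURCE A (Python) =====
-- def find_val(b, n, target):
--
--     pvals = []
--     for sum in range(1, n+1):
--         for x in range(sum + 1):
--             pvals.append((x, sum-x))
--
--     for combo in pvals:
--         if combo[0] + combo[1] * b == target:
--             return True
--     return False
-- ===== SOURCE B (Python) =====
-- def find_val(b, n, target):
--     # For each sum s in 1..n, A scans all splits (x, s-x); writing y = s-x,
--     # x + y*b == target  <=>  y*(b-1) == target - s, so solve for y directly.
--     for s in range(1, n + 1):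
--         if b == 1:
--             if s == target:
--                 return True
--         else:
--             q, r = divmod(target - s, b - 1)
--             if r == 0 and 0 <= q <= s:
--                 return True
--     return False
-- ===== Notes on version B (the rewrite author's own statement) =====
-- stated objective: faster
-- what changed: Instead of enumerating all O(n^2) splits (x, s-x) for every sum s, B solves the linear equation y*(b-1) = target - s for the unique candidate y per sum with divmod and range-checks it.
import Mathlib
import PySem

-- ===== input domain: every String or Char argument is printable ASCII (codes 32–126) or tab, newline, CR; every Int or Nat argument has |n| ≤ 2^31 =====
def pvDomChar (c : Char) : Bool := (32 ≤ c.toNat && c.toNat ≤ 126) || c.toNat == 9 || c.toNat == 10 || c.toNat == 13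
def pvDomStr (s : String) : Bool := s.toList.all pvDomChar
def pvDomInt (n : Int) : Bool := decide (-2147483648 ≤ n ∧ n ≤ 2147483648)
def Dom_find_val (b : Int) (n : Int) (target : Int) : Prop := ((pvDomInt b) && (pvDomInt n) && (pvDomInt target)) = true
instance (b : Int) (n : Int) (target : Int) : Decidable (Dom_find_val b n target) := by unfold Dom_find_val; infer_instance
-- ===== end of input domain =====

-- B replaces A's O(n^2) enumeration of all splits (x, s-x) by solving, for each sum s,
-- the linear equation y*(b-1) = target - s with divmod and a range check (faster, O(n)).

-- ===== PORT A =====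
def find_val (b : Int) (n : Int) (target : Int) : Bool :=
  ((PySem.List.pyRange 1 (n+1) 1).foldl
    (fun acc s => (PySem.List.pyRange 0 (s+1) 1).foldl
      (fun acc2 x => acc2 ++ [(x, s - x)]) acc) []).any
    (fun combo => combo.1 + combo.2 * b == target)

-- ===== PORT B =====
def find_val_alt (b : Int) (n : Int) (target : Int) : Bool :=
  (PySem.List.pyRange 1 (n+1) 1).any (fun s =>
    if b == 1 then s == target
    else
      let q := PySem.Int.floordiv (target - s) (b - 1)
      let r := PySem.Int.mod (target - s) (b - 1)
      r == 0 && decide (0 ≤ q) && decide (q ≤ s))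

-- ===== PRECONDITION & SPEC =====
def Spec_find_val (b : Int) (n : Int) (target : Int) (out : Bool) : Prop := out = find_val_alt b n target
instance (b : Int) (n : Int) (target : Int) (out : Bool) : Decidable (Spec_find_val b n target out) := by unfold Spec_find_val; infer_instance

-- ===== CLAIM (what is proved, stated in full; the proofs are below) =====
def Claim_equal_find_val : Prop := ∀ (b : Int) (n : Int) (target : Int), Dom_find_val b n target → Spec_find_val b n target (find_val b n target)

-- ===== LEMMAS AND PROOFS =====

theorem any_congr_mem {α : Type} {l : List α} {f g : α → Bool}
    (h : ∀ x ∈ l, f x = g x) : l.any f = l.any g := by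
  induction l with
  | nil => rfl
  | cons a t ih =>
    simp only [List.any_cons]
    rw [h a (by simp), ih (fun x hx => h x (by simp [hx]))]

-- For a fixed sum s ≥ 1, scanning all splits equals solving the linear equation.
theorem inner_eq (b target s : Int) (hs : 1 ≤ s) :
    (PySem.List.pyRange 0 (s+1) 1).any (fun x => x + (s - x) * b == target) =
    (if b == 1 then (s == target : Bool)
     else
       let q := PySem.Int.floordiv (target - s) (b - 1)
       let r := PySem.Int.mod (target - s) (b - 1)
       r == 0 && decide (0 ≤ q) && decide (q ≤ s)) := by
  rw [Bool.eq_iff_iff]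
  simp only [List.any_eq_true, PySem.List.mem_pyRange_one, beq_iff_eq]
  by_cases hb : b = 1
  · subst hb
    rw [if_pos (by decide)]
    simp only [beq_iff_eq, mul_one]
    constructor
    · rintro ⟨x, ⟨hx0, hx1⟩, he⟩; omega
    · intro he; exact ⟨0, ⟨le_refl _, by omega⟩, by omega⟩
  · have hd : b - 1 ≠ 0 := by omega
    rw [if_neg (by simpa using hb)]
    simp only [Bool.and_eq_true, beq_iff_eq, decide_eq_true_eq]
    have hkey := PySem.Int.floordiv_mul_add_mod (target - s) (b - 1)
    constructor
    · rintro ⟨x, ⟨hx0, hx1⟩, he⟩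
      have hdvd : (b - 1) ∣ (target - s) := ⟨s - x, by linear_combination -he⟩
      have hr : PySem.Int.mod (target - s) (b - 1) = 0 :=
        (PySem.Int.mod_eq_zero_iff_dvd _ _).mpr hdvd
      have hq : PySem.Int.floordiv (target - s) (b - 1) = s - x := by
        rw [hr, add_zero] at hkey
        have h0 : (PySem.Int.floordiv (target - s) (b - 1) - (s - x)) * (b - 1) = 0 := by
          linear_combination hkey - he
        rcases mul_eq_zero.mp h0 with h | h
        · omega
        · exact absurd h hd
      exact ⟨⟨hr, by omega⟩, by omega⟩
    · rintro ⟨⟨hr, hq0⟩, hqs⟩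
      set q := PySem.Int.floordiv (target - s) (b - 1) with hqdef
      refine ⟨s - q, ⟨by omega, by omega⟩, ?_⟩
      rw [hr, add_zero] at hkey
      linear_combination hkey

theorem find_val_eq (b n target : Int) : find_val b n target = find_val_alt b n target := by
  unfold find_val find_val_alt
  rw [PySem.List.foldl_congr_mem'
      (l := PySem.List.pyRange 1 (n+1) 1) (init := [])
      (f := fun acc s => (PySem.List.pyRange 0 (s+1) 1).foldl
        (fun acc2 x => acc2 ++ [(x, s - x)]) acc)
      (g := fun (acc : List (Int × Int)) s =>
        acc ++ (PySem.List.pyRange 0 (s+1) 1).map (fun x => (x, s - x)))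
      (fun s _ acc => PySem.List.foldl_append_singleton_eq_map _ _ _),
    PySem.List.foldl_append_eq_flatMap, List.nil_append, List.any_flatMap]
  refine any_congr_mem (fun s hs => ?_)
  rw [List.any_map]
  have hs1 : 1 ≤ s := (PySem.List.mem_pyRange_one.mp hs).1
  simpa using inner_eq b target s hs1

-- ===== VERDICT (by name: the statement is the Claim_ definition above) =====
theorem find_val_spec : Claim_equal_find_val := by
  intro b n target _
  exact find_val_eq b n target
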